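-- pv_equiv track=rewrite | github.com/zxp19821005/arch-zst-backup | src/utils/common_utils.py | count_duplicate_packages
-- ===== SOURCE A (Python) =====
-- def count_duplicate_packages(packages):
--     """
--     计算重复软件包数量
--     :param packages: 软件包列表
--     :return: 重复软件包数量
--     """
--     if not packages:
--         return 0
--
--     # 按名称和架构分组软件包
--     grouped = {}
--     for pkg in packages:
--         key = (pkg['pkgname'], pkg['arch'])
--         grouped.setdefault(key, []).append(pkg)
--
--     # 计算重复软件包数量
--     duplicate_count = 0
--     for pkgs in grouped.values():
--         if len(pkgs) > 1:
--             duplicate_count += len(pkgs) - 1  # 每组中除了最新版本外，其余都算作重复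
--
--     return duplicate_count
-- ===== SOURCE B (Python) =====
-- def count_duplicate_packages(packages):
--     """
--     计算重复软件包数量: a package is a duplicate exactly when its
--     (pkgname, arch) key already occurred at an earlier position, so count,
--     by a brute-force scan of each prefix, the non-first occurrences.
--     """
--     keys = [(pkg['pkgname'], pkg['arch']) for pkg in packages]
--     duplicates = 0
--     for i, key in enumerate(keys):
--         if key in keys[:i]:
--             duplicates += 1
--     return duplicates
-- ===== Notes on version B (the rewrite author's own statement) =====
-- stated objective: alternative
-- what changed: B drops the grouping dict and the per-group summation entirely: it counts a package as duplicate iff its (pkgname, arch) key appears in the prefix of earlier keys, by a brute-force prefix scan with no dict or set at all.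
import Mathlib
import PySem

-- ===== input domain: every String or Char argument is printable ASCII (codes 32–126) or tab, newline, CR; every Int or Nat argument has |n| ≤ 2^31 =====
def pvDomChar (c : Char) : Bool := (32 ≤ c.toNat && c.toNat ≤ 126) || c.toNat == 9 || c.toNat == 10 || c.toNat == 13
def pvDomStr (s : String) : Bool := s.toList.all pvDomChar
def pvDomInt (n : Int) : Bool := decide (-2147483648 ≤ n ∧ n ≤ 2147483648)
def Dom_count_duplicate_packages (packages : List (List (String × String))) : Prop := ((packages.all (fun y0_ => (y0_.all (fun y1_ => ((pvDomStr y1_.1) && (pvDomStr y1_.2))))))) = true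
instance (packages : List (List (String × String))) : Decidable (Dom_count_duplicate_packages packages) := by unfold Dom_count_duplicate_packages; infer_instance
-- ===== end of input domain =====

-- B replaces A's grouping dict and per-group summation by a quadratic brute-force scan:
-- a package counts as duplicate iff its (pkgname, arch) key occurs among the earlier keys.


-- ===== PORT A =====
-- (pkg['pkgname'], pkg['arch']) — total form of the dict lookups; exact under Pre_ (both keys present)
def pvKey (pkg : List (String × String)) : String × String :=
  (PySem.Dict.getD ⟨pkg⟩ "pkgname" "", PySem.Dict.getD ⟨pkg⟩ "arch" "")

def count_duplicate_packages (packages : List (List (String × String))) : Int :=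
  if packages = [] then 0
  else
    let grouped := packages.foldl
      (fun d pkg => d.modify (pvKey pkg) [] (fun v => v ++ [pkg]))
      PySem.Dict.empty
    grouped.values.foldl
      (fun acc pkgs => if 1 < pkgs.length then acc + ((pkgs.length : Int) - 1) else acc) 0

-- ===== PORT B =====
def count_duplicate_packages_alt (packages : List (List (String × String))) : Int :=
  let keys := packages.map pvKey
  (PySem.List.enumerate keys).foldl
    (fun duplicates p =>
      if (PySem.List.slice keys none (some p.1)).contains p.2 then duplicates + 1 else duplicates)
    0

-- ===== PRECONDITION & SPEC =====
-- Pre_ excludes exactly the inputs where pkg['pkgname'] or pkg['arch'] raises KeyError in A (and in B).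
def Pre_count_duplicate_packages (packages : List (List (String × String))) : Prop :=
  ∀ pkg ∈ packages,
    (PySem.Dict.mk pkg).contains "pkgname" = true ∧ (PySem.Dict.mk pkg).contains "arch" = true
instance (packages : List (List (String × String))) : Decidable (Pre_count_duplicate_packages packages) := by
  unfold Pre_count_duplicate_packages; infer_instance

def pvWitness_count_duplicate_packages : (List (List (String × String))) :=
  [[("pkgname", "foo"), ("arch", "x86_64")], [("pkgname", "foo"), ("arch", "x86_64")]]

def Spec_count_duplicate_packages (packages : List (List (String × String))) (out : Int) : Prop := out = count_duplicate_packages_alt packages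
instance (packages : List (List (String × String))) (out : Int) : Decidable (Spec_count_duplicate_packages packages out) := by unfold Spec_count_duplicate_packages; infer_instance

-- ===== CLAIM (what is proved, stated in full; the proofs are below) =====
def Claim_equal_count_duplicate_packages : Prop := ∀ (packages : List (List (String × String))), Dom_count_duplicate_packages packages → Pre_count_duplicate_packages packages → Spec_count_duplicate_packages packages (count_duplicate_packages packages)

-- ===== LEMMAS AND PROOFS =====

-- the duplicate-counting fold over nonempty groups sums (len - 1)
lemma foldl_dup (L : List (List (List (String × String)))) (h : ∀ v ∈ L, v ≠ []) (a : Int) :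
    L.foldl (fun acc v => if 1 < v.length then acc + ((v.length : Int) - 1) else acc) a
      = a + (((L.map List.length).sum : Nat) : Int) - (L.length : Int) := by
  induction L generalizing a with
  | nil => simp
  | cons v t ih =>
    have hv : v ≠ [] := h v (by simp)
    have h1 : 1 ≤ v.length := List.length_pos_of_ne_nil hv
    simp only [List.foldl_cons, List.map_cons, List.sum_cons, List.length_cons]
    rw [ih (fun w hw => h w (by simp [hw]))]
    by_cases hl : 1 < v.length
    · simp only [if_pos hl]; push_cast; ring
    · have h2 : v.length = 1 := by omega
      simp only [h2]; push_cast; ring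

lemma grouped_getD (ps : List (List (String × String))) (k : String × String) :
    (ps.foldl (fun d pkg => d.modify (pvKey pkg) [] (fun v => v ++ [pkg])) PySem.Dict.empty).getD k []
      = ps.filter (fun x => pvKey x == k) := by
  have hfold : ps.foldl (fun d pkg => d.modify (pvKey pkg) [] (fun v => v ++ [pkg])) PySem.Dict.empty
      = (ps.map (fun x => (pvKey x, x))).foldl
          (fun d p => d.modify p.1 [] (fun v => v ++ [p.2])) PySem.Dict.empty := by
    rw [List.foldl_map]
  rw [hfold, PySem.Dict.getD_foldl_modify_append]
  simp [List.filter_map, Function.comp_def, List.map_map]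

lemma grouped_keys (ps : List (List (String × String))) :
    (ps.foldl (fun d pkg => d.modify (pvKey pkg) [] (fun v => v ++ [pkg])) PySem.Dict.empty).keys
      = PySem.Set.ofList (ps.map pvKey) := by
  rw [PySem.Dict.keys_foldl_modify_key ps pvKey [] (fun _ pkg => (fun v => v ++ [pkg]))]
  rw [PySem.Dict.keys_empty, PySem.Set.ofList_eq_foldl]
  rfl

-- A in closed form: length minus number of distinct keys
lemma count_dup_A_closed (ps : List (List (String × String))) :
    count_duplicate_packages ps
      = (ps.length : Int) - ((PySem.Set.ofList (ps.map pvKey)).length : Int) := by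
  unfold count_duplicate_packages
  rcases eq_or_ne ps [] with h | h
  · subst h; simp [PySem.Set.ofList_nil]
  · simp only [if_neg h]
    set l := ps.map pvKey with hl
    set S := PySem.Set.ofList l with hS
    set grouped := ps.foldl (fun d pkg => d.modify (pvKey pkg) [] (fun v => v ++ [pkg])) PySem.Dict.empty with hg
    have hkeys : grouped.keys = S := grouped_keys ps
    have hnd : grouped.keys.Nodup := by rw [hkeys]; exact PySem.Set.nodup_ofList l
    have hitem : ∀ p ∈ grouped.items, p.2 = ps.filter (fun x => pvKey x == p.1) := by
      rintro ⟨k, v⟩ hp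
      have := PySem.Dict.getD_of_mem_items grouped hp hnd []
      rw [← this, hg, grouped_getD]
    have hvals : grouped.values = grouped.items.map (·.2) := rfl
    have hkeys' : grouped.keys = grouped.items.map (·.1) := rfl
    have hvne : ∀ v ∈ grouped.values, v ≠ [] := by
      rw [hvals]
      intro v hv
      obtain ⟨p, hp, rfl⟩ := List.mem_map.mp hv
      rw [hitem p hp]
      have hk : p.1 ∈ grouped.keys := by rw [hkeys']; exact List.mem_map_of_mem hp
      rw [hkeys, hS, PySem.Set.mem_ofList, hl] at hk
      obtain ⟨x, hx, hxk⟩ := List.mem_map.mp hk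
      intro hcon
      have : x ∈ ps.filter (fun x => pvKey x == p.1) := List.mem_filter.mpr ⟨hx, by simp [hxk]⟩
      simp [hcon] at this
    rw [foldl_dup _ hvne 0]
    have hlen : grouped.values.length = S.length := by
      rw [hvals, List.length_map, ← hkeys, hkeys', List.length_map]
    have hsum : (grouped.values.map List.length).sum = ps.length := by
      rw [hvals, List.map_map]
      have hmc : grouped.items.map (List.length ∘ (·.2))
          = grouped.items.map ((fun k => l.countP (fun x => decide (x = k))) ∘ (·.1)) := by
        apply List.map_congr_left
        intro p hp
        simp only [Function.comp_apply]
        rw [hitem p hp, ← List.countP_eq_length_filter, hl, List.countP_map]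
        congr 1
        funext x
        simp [Function.comp_apply, Bool.beq_eq_decide_eq]
      rw [hmc, ← List.map_map, ← hkeys', hkeys]
      have hperm : S.Perm l.dedup := by
        rw [List.perm_ext_iff_of_nodup (by rw [hS]; exact PySem.Set.nodup_ofList l) l.nodup_dedup]
        intro a
        rw [hS, PySem.Set.mem_ofList, List.mem_dedup]
      have hded : (l.dedup.map (fun k => l.countP (fun x => decide (x = k)))).sum = l.length := by
        have := List.sum_map_count_dedup_eq_length l
        rw [← this]
        congr 1
      calc (S.map (fun k => l.countP (fun x => decide (x = k)))).sum
          = ((l.dedup).map (fun k => l.countP (fun x => decide (x = k)))).sum := (hperm.map _).sum_eq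
        _ = l.length := hded
        _ = ps.length := by rw [hl, List.length_map]
    rw [hsum, hlen]
    ring

-- B's prefix-scan fold in closed form, by induction from the right
lemma foldl_prefix_scan (l : List (String × String)) :
    ∀ (a : Int),
      (PySem.List.enumerate l).foldl
        (fun duplicates p =>
          if (PySem.List.slice l none (some p.1)).contains p.2 then duplicates + 1 else duplicates) a
      = a + (l.length : Int) - ((PySem.Set.ofList l).length : Int) := by
  induction l using List.reverseRecOn with
  | nil => intro a; simp [PySem.List.enumerate, PySem.Set.ofList_nil]
  | append_singleton l x ih =>
    intro a
    rw [PySem.List.enumerate_append, List.foldl_append]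
    have hbody : (PySem.List.enumerate l).foldl
        (fun duplicates p =>
          if (PySem.List.slice (l ++ [x]) none (some p.1)).contains p.2 then duplicates + 1 else duplicates) a
        = (PySem.List.enumerate l).foldl
        (fun duplicates p =>
          if (PySem.List.slice l none (some p.1)).contains p.2 then duplicates + 1 else duplicates) a := by
      apply PySem.List.foldl_congr_mem
      intro acc p hp
      obtain ⟨k, hk, hpe⟩ := (PySem.List.mem_enumerate_iff _ _ _).mp hp
      subst hpe
      simp only [zero_add]
      rw [PySem.List.slice_to_natCast, PySem.List.slice_to_natCast,
        List.take_append_of_le_length (le_of_lt hk)]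
    rw [hbody, ih a]
    have hsingle : PySem.List.enumerate [x] ((0 : Int) + l.length) = [((l.length : Int), x)] := by
      simp [PySem.List.enumerate_cons, PySem.List.enumerate_nil]
    rw [hsingle]
    simp only [List.foldl_cons, List.foldl_nil]
    rw [PySem.List.slice_to_natCast, List.take_left]
    rw [PySem.Set.ofList_append_singleton]
    by_cases hx : x ∈ l
    · have hc : l.contains x = true := by simpa using hx
      rw [hc, PySem.Set.add_of_mem (by rw [PySem.Set.mem_ofList]; exact hx)]
      simp only [if_true, List.length_append, List.length_singleton]
      push_cast; ring
    · have hc : l.contains x = false := by simpa using hx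
      rw [hc, PySem.Set.add_of_not_mem (by rw [PySem.Set.mem_ofList]; exact hx)]
      simp only [List.length_append, List.length_singleton]
      push_cast; ring

lemma count_dup_B_closed (ps : List (List (String × String))) :
    count_duplicate_packages_alt ps
      = (ps.length : Int) - ((PySem.Set.ofList (ps.map pvKey)).length : Int) := by
  unfold count_duplicate_packages_alt
  rw [foldl_prefix_scan (ps.map pvKey) 0]
  rw [List.length_map]
  ring

-- ===== VERDICT (by name: the statement is the Claim_ definition above) =====
theorem count_duplicate_packages_spec : Claim_equal_count_duplicate_packages := by
  intro ps _ _
  unfold Spec_count_duplicate_packages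
  rw [count_dup_A_closed, count_dup_B_closed]
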